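-- pv_equiv track=rewrite | github.com/Zekai-Zhao775/LeetCode | Juejin/29. 小D的 `abc` 变换问题.py | solution
-- ===== SOURCE A (Python) =====
-- def solution(s: str, k: int) -> str:
--     # PLEASE DO NOT MODIFY THE FUNCTION SIGNATURE
--     # write code here
--     result = []
--     i = 0
--     string_temp = s
--
--     while i < k:
--         result.clear()
--         for char in string_temp:
--             if char == 'a':
--                 result.append('bc')
--             elif char == 'b':
--                 result.append('ca')
--             elif char == 'c':
--                 result.append('ab')
--         string_temp = ''.join(result)
--         i += 1
--
--     return string_temp
-- ===== SOURCE B (Python) =====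
-- def solution(s: str, k: int) -> str:
--     if k <= 0:
--         return s
--     if all(c not in 'abc' for c in s):
--         return ''
--     def expand(e):
--         return ''.join('bc' if x == 'a' else 'ca' if x == 'b' else 'ab' for x in e)
--     ea, eb, ec = 'a', 'b', 'c'
--     for _ in range(k):
--         ea, eb, ec = expand(ea), expand(eb), expand(ec)
--     return ''.join(ea if c == 'a' else eb if c == 'b' else ec if c == 'c' else '' for c in s)
-- ===== Notes on version B (the rewrite author's own statement) =====
-- stated objective: alternative
-- what changed: Instead of rewriting the whole string k times, B iterates the one-step rule k times on the three single symbols 'a','b','c' to get their k-step expansions, and then concatenates the appropriate expansion for each character of s in one pass (with early returns for k<=0 and for strings with no abc characters).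
import Mathlib
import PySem

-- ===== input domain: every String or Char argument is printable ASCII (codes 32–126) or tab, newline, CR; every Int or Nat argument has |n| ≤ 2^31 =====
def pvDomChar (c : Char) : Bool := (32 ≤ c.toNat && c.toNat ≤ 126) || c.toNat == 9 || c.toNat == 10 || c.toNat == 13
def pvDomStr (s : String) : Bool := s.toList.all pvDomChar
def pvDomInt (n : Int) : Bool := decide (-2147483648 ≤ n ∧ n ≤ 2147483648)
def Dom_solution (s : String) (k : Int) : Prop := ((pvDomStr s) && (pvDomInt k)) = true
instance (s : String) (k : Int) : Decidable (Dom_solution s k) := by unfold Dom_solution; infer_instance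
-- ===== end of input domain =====

-- B computes the k-step expansions of the three symbols once and concatenates them per input
-- character, instead of rewriting the whole string k times (objective: alternative).

-- ===== PORT A =====
-- one pass of the inner for-loop: result is the list of appended pieces, joined afterwards
def stepA (t : List Char) : List Char :=
  (t.foldl (fun res char =>
      if char = 'a' then res ++ [['b','c']]
      else if char = 'b' then res ++ [['c','a']]
      else if char = 'c' then res ++ [['a','b']]
      else res) []).flatten

-- the while-loop: i counts up to k, i.e. max(k,0) iterations
def loopA : List Char → Nat → List Char
  | t, 0 => t
  | t, n+1 => loopA (stepA t) n

def solution (s : String) (k : Int) : String :=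
  String.ofList (loopA s.toList k.toNat)

-- ===== PORT B =====
-- B's expand helper (total if-chain over the three symbols)
def expandB (e : List Char) : List Char :=
  (e.map (fun x =>
      if x = 'a' then ['b','c']
      else if x = 'b' then ['c','a']
      else if x = 'c' then ['a','b']
      else [])).flatten

def loopB : List Char × List Char × List Char → Nat → List Char × List Char × List Char
  | t, 0 => t
  | (ea, eb, ec), n+1 => loopB (expandB ea, expandB eb, expandB ec) n

def solution_alt (s : String) (k : Int) : String :=
  if k ≤ 0 then s
  else if s.toList.all (fun c => !(c == 'a' || c == 'b' || c == 'c')) then ""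
  else
    let t := loopB (['a'], ['b'], ['c']) k.toNat
    String.ofList ((s.toList.map (fun c =>
      if c = 'a' then t.1 else if c = 'b' then t.2.1 else if c = 'c' then t.2.2 else [])).flatten)

-- ===== PRECONDITION & SPEC =====
def Spec_solution (s : String) (k : Int) (out : String) : Prop := out = solution_alt s k
instance (s : String) (k : Int) (out : String) : Decidable (Spec_solution s k out) := by unfold Spec_solution; infer_instance

-- ===== CLAIM (what is proved, stated in full; the proofs are below) =====
def Claim_equal_solution : Prop := ∀ (s : String) (k : Int), Dom_solution s k → Spec_solution s k (solution s k)

-- ===== LEMMAS AND PROOFS =====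

-- A's fold with accumulator, characterised
theorem stepA_eq (t : List Char) : stepA t = expandB t := by
  have h : ∀ (t : List Char) (acc : List (List Char)),
      (t.foldl (fun res char =>
        if char = 'a' then res ++ [['b','c']]
        else if char = 'b' then res ++ [['c','a']]
        else if char = 'c' then res ++ [['a','b']]
        else res) acc).flatten
      = acc.flatten ++ (t.map (fun x =>
          if x = 'a' then ['b','c']
          else if x = 'b' then ['c','a']
          else if x = 'c' then ['a','b']
          else [])).flatten := by
    intro t
    induction t with
    | nil => simp
    | cons c rest ih =>
        intro acc
        simp only [List.foldl_cons, List.map_cons, List.flatten_cons]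
        rw [ih]
        split_ifs <;> simp
  simpa [stepA, expandB] using h t []

theorem stepA_append (t₁ t₂ : List Char) : stepA (t₁ ++ t₂) = stepA t₁ ++ stepA t₂ := by
  simp [stepA_eq, expandB]

theorem loopA_append (n : Nat) (t₁ t₂ : List Char) :
    loopA (t₁ ++ t₂) n = loopA t₁ n ++ loopA t₂ n := by
  induction n generalizing t₁ t₂ with
  | zero => rfl
  | succ n ih => simp [loopA, stepA_append, ih]

theorem loopA_nil (n : Nat) : loopA [] n = [] := by
  induction n with
  | zero => rfl
  | succ n ih => simpa [loopA, stepA] using ih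

theorem loopA_flat (n : Nat) (t : List Char) :
    loopA t n = (t.map (fun c => loopA [c] n)).flatten := by
  induction t with
  | nil => simp [loopA_nil]
  | cons c rest ih =>
      have : (c :: rest) = [c] ++ rest := rfl
      rw [this, loopA_append, ih]; simp

theorem loopB_eq (n : Nat) (ea eb ec : List Char) :
    loopB (ea, eb, ec) n = (loopA ea n, loopA eb n, loopA ec n) := by
  induction n generalizing ea eb ec with
  | zero => rfl
  | succ n ih => simp [loopB, loopA, ih, stepA_eq]

-- after one step, a non-abc character contributes nothing
theorem loopA_single_other (n : Nat) (c : Char) (ha : c ≠ 'a') (hb : c ≠ 'b') (hc : c ≠ 'c') :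
    loopA [c] (n+1) = [] := by
  simp [loopA, stepA, ha, hb, hc, loopA_nil]

-- ===== VERDICT (by name: the statement is the Claim_ definition above) =====
-- main equality, stated on the list level for k.toNat
theorem main_eq (s : String) (k : Int) : solution s k = solution_alt s k := by
  unfold solution solution_alt
  by_cases hk : k ≤ 0
  · have : k.toNat = 0 := Int.toNat_of_nonpos hk
    simp [this, loopA, hk]
  · obtain ⟨n, hn⟩ : ∃ n, k.toNat = n + 1 := by
      refine ⟨k.toNat - 1, ?_⟩; omega
    simp only [hk, if_false, hn]
    rw [loopB_eq, loopA_flat]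
    by_cases hall : s.toList.all (fun c => !(c == 'a' || c == 'b' || c == 'c')) = true
    · simp only [hall, if_true]
      have : ∀ c ∈ s.toList, loopA [c] (n+1) = [] := by
        intro c hc
        have := List.all_eq_true.mp hall c hc
        simp only [Bool.not_eq_eq_eq_not, Bool.not_true, Bool.or_eq_false_iff, beq_eq_false_iff_ne] at this
        exact loopA_single_other n c this.1.1 this.1.2 this.2
      have hmap : s.toList.map (fun c => loopA [c] (n+1)) = s.toList.map (fun _ => []) :=
        List.map_congr_left this
      simp [hmap]
    · simp only [hall]
      congr 1
      congr 1
      apply List.map_congr_left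
      intro c _
      by_cases ha : c = 'a'
      · subst ha; simp [loopA, stepA]
      by_cases hb : c = 'b'
      · subst hb; simp [loopA, stepA]
      by_cases hc : c = 'c'
      · subst hc; simp [loopA, stepA]
      simp [ha, hb, hc, loopA_single_other n c ha hb hc]

theorem solution_spec : Claim_equal_solution := by
  intro s k _
  unfold Spec_solution
  exact main_eq s k
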